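-- pv_equiv track=rewrite | github.com/Ublyudok-kun/reversi | deshacerJugadas.py | deshacer_izquierda
-- ===== SOURCE A (Python) =====
-- def deshacer_izquierda(tablero, x, y, xf, yf, turno, dimension):
--     if (y >= 0 and y < dimension):
--         try:
--             # izq
--             if ((x == xf) and (y > yf+1)):
--                 tablero[x][y-1] = turno*-1
--                 deshacer_izquierda(tablero, x, y-1, xf, yf, turno, dimension)
--             else:
--                 return tablero
--         except:
--             IndexError
--     return tablero
-- ===== SOURCE B (Python) =====
-- def deshacer_izquierda(tablero, x, y, xf, yf, turno, dimension):
--     if 0 <= y < dimension and x == xf and y > yf + 1: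
--         fila = tablero[x]
--         for c in range(y - 1, yf, -1):
--             fila[c] = -turno
--     return tablero
-- ===== Notes on version B (the rewrite author's own statement) =====
-- stated objective: simpler
-- what changed: A's board-level tail recursion (re-checking every condition and re-indexing the board per call, with a try/except that swallows IndexError) becomes one guard, one row fetch and one for-loop over range(y-1, yf, -1); Pre_ excludes inputs where the walk leaves the board (row index x out of range, row shorter than y, or yf < -1 so columns go negative), on which A's partially-flipped result is an artefact of the swallowed IndexError and Python's negative-index wraparound while B raises IndexError or flips wrapped cells.
-- outside the precondition, e.g. on deshacer_izquierda([[1, 2, 3]], 5, 2, 5, 0, 1, 3): A returns [[1, 2, 3]], B raises IndexError; on deshacer_izquierda([[1]], 0, 2, 0, 0, 1, 3): A returns [[1]], B raises IndexError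
import Mathlib
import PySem

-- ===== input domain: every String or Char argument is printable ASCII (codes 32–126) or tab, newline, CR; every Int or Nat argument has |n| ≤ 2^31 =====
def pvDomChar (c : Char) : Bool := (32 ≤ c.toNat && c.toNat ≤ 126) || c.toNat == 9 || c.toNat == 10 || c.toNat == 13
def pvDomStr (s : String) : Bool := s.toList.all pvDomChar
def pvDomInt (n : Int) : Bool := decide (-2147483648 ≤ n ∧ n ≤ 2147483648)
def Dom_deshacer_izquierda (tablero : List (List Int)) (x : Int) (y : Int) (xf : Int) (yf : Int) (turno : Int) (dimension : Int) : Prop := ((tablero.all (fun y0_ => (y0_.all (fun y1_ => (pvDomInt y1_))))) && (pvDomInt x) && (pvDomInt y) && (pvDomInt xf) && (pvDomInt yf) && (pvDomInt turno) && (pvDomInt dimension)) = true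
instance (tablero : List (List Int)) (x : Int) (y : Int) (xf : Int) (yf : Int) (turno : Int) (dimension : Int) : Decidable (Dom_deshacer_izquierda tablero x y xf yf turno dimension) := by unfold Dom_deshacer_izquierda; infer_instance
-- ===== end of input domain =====

-- B replaces A's board-level tail recursion (re-checking every condition and re-indexing
-- the board per call, try/except swallowing IndexError) by one guard, one row fetch and
-- one for-loop over range(y-1, yf, -1): simpler. Both mutate `tablero` in place in
-- Python (the same mutation inside Pre_); the equivalence proved is about the returned value.

-- ===== PORT A =====
-- Literal port of A's recursion; the swallowed exception of the failed fetch/assignment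
-- `tablero[x][y-1] = turno*-1` is the `none` branch of pyGet?/pySet? (return tablero).
def deshacer_izquierda (tablero : List (List Int)) (x : Int) (y : Int) (xf : Int) (yf : Int) (turno : Int) (dimension : Int) : List (List Int) :=
  if _h : 0 ≤ y ∧ y < dimension then
    if x = xf ∧ y > yf + 1 then
      match PySem.List.pyGet? tablero x with
      | none => tablero
      | some fila =>
        match PySem.List.pySet? fila (y - 1) (turno * -1) with
        | none => tablero
        | some fila2 =>
          deshacer_izquierda (PySem.List.pySetD tablero x fila2) x (y - 1) xf yf turno dimension
    else tablero
  else tablero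
termination_by (y + 1).toNat
decreasing_by omega

-- ===== PORT B =====
-- fila = tablero[x]; the for-loop over range(y-1, yf, -1) is the foldl; writing the
-- mutated row back models Python's in-place mutation of the aliased row.
def deshacer_izquierda_alt (tablero : List (List Int)) (x : Int) (y : Int) (xf : Int) (yf : Int) (turno : Int) (dimension : Int) : List (List Int) :=
  if 0 ≤ y ∧ y < dimension ∧ x = xf ∧ y > yf + 1 then
    PySem.List.pySetD tablero x
      ((PySem.List.pyRange (y - 1) yf (-1)).foldl
        (fun fila c => PySem.List.pySetD fila c (-turno))
        (PySem.List.pyGetD tablero x []))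
  else tablero

-- ===== PRECONDITION & SPEC =====
-- Pre_ excludes inputs where the walk leaves the board (row index x out of range, row
-- shorter than y, or yf < -1 so columns go negative): there A's partially-flipped result
-- is an artefact of the swallowed IndexError and negative-index wraparound, while B
-- raises IndexError or flips wrapped cells.
def Pre_deshacer_izquierda (tablero : List (List Int)) (x : Int) (y : Int) (xf : Int) (yf : Int) (turno : Int) (dimension : Int) : Prop :=
  (0 ≤ y ∧ y < dimension ∧ x = xf ∧ y > yf + 1) →
    (0 ≤ x ∧ x < PySem.List.len tablero ∧ -1 ≤ yf ∧
      y ≤ PySem.List.len (PySem.List.pyGetD tablero x []))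
instance (tablero : List (List Int)) (x : Int) (y : Int) (xf : Int) (yf : Int) (turno : Int) (dimension : Int) : Decidable (Pre_deshacer_izquierda tablero x y xf yf turno dimension) := by unfold Pre_deshacer_izquierda; infer_instance

def pvWitness_deshacer_izquierda : List (List Int) × Int × Int × Int × Int × Int × Int :=
  ([[0, 0, 0]], 0, 2, 0, -1, 1, 3)

def Spec_deshacer_izquierda (tablero : List (List Int)) (x : Int) (y : Int) (xf : Int) (yf : Int) (turno : Int) (dimension : Int) (out : List (List Int)) : Prop := out = deshacer_izquierda_alt tablero x y xf yf turno dimension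
instance (tablero : List (List Int)) (x : Int) (y : Int) (xf : Int) (yf : Int) (turno : Int) (dimension : Int) (out : List (List Int)) : Decidable (Spec_deshacer_izquierda tablero x y xf yf turno dimension out) := by unfold Spec_deshacer_izquierda; infer_instance

-- ===== CLAIM =====
def Claim_equal_deshacer_izquierda : Prop := ∀ (tablero : List (List Int)) (x : Int) (y : Int) (xf : Int) (yf : Int) (turno : Int) (dimension : Int), Dom_deshacer_izquierda tablero x y xf yf turno dimension → Pre_deshacer_izquierda tablero x y xf yf turno dimension → Spec_deshacer_izquierda tablero x y xf yf turno dimension (deshacer_izquierda tablero x y xf yf turno dimension)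

-- ===== LEMMAS AND PROOFS =====

lemma pyIdx?_of_nonneg (n : Nat) (i : Int) (h0 : 0 ≤ i) (h1 : i < n) :
    PySem.List.pyIdx? n i = some i.toNat := by
  simp only [PySem.List.pyIdx?]
  split_ifs <;> simp_all

lemma pyGet?_of_nonneg {α : Type} (xs : List α) (i : Int) (h0 : 0 ≤ i) (h1 : i < (xs.length : Int)) :
    PySem.List.pyGet? xs i = xs[i.toNat]? := by
  simp [PySem.List.pyGet?, pyIdx?_of_nonneg xs.length i h0 (by omega)]

lemma pySet?_of_nonneg (xs : List Int) (i : Int) (v : Int) (h0 : 0 ≤ i) (h1 : i < (xs.length : Int)) :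
    PySem.List.pySet? xs i v = some (xs.set i.toNat v) := by
  simp [PySem.List.pySet?, pyIdx?_of_nonneg xs.length i h0 (by omega)]

-- the heart: A's recursion computes B's row-fold expression
lemma pv_key (xf yf turno dimension : Int) (hyf : -1 ≤ yf) :
    ∀ (m : Nat) (t : List (List Int)) (x y : Int), (y + 1).toNat ≤ m →
      0 ≤ x → x < (t.length : Int) →
      (y > yf + 1 → y ≤ ((PySem.List.pyGetD t x []).length : Int)) →
      deshacer_izquierda t x y xf yf turno dimension
        = deshacer_izquierda_alt t x y xf yf turno dimension := by
  intro m
  induction m with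
  | zero =>
    intro t x y hm _ _ _
    rw [deshacer_izquierda, deshacer_izquierda_alt]
    rw [dif_neg (by omega), if_neg (by omega)]
  | succ m ih =>
    intro t x y hm hx0 hxl hrow
    by_cases hcond : 0 ≤ y ∧ y < dimension ∧ x = xf ∧ y > yf + 1
    · obtain ⟨hy0, hyd, hxf, hyyf⟩ := hcond
      have hxlt : x.toNat < t.length := by omega
      have hrowget : PySem.List.pyGetD t x [] = t[x.toNat] :=
        PySem.List.pyGetD_eq_getElem t [] hx0 hxl
      have hrlen : y ≤ (t[x.toNat].length : Int) := by
        rw [← hrowget]; exact hrow hyyf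
      have hc0 : 0 ≤ y - 1 := by omega
      have hg : PySem.List.pyGet? t x = some t[x.toNat] := by
        rw [pyGet?_of_nonneg t x hx0 hxl, List.getElem?_eq_getElem hxlt]
      have hs : PySem.List.pySet? t[x.toNat] (y - 1) (turno * -1)
          = some (t[x.toNat].set (y - 1).toNat (turno * -1)) :=
        pySet?_of_nonneg _ _ _ hc0 (by omega)
      rw [deshacer_izquierda, dif_pos ⟨hy0, hyd⟩, if_pos ⟨hxf, hyyf⟩]
      simp only [hg, hs]
      set row2 := t[x.toNat].set (y - 1).toNat (turno * -1) with hrow2def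
      have hrow2len : row2.length = t[x.toNat].length := by rw [hrow2def]; simp
      have ht'set : PySem.List.pySetD t x row2 = t.set x.toNat row2 :=
        PySem.List.pySetD_of_nonneg t row2 hx0
      have ht'len : (t.set x.toNat row2).length = t.length := by simp
      have hrow2' : PySem.List.pyGetD (t.set x.toNat row2) x [] = row2 := by
        rw [PySem.List.pyGetD_eq_getElem _ _ hx0 (by rw [ht'len]; omega)]
        simp
      rw [ht'set, ih (t.set x.toNat row2) x (y - 1) (by omega) hx0 (by rw [ht'len]; omega)
        (fun _ => by rw [hrow2', hrow2len]; omega)]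
      have hstep : PySem.List.pySetD t[x.toNat] (y - 1) (-turno) = row2 := by
        rw [PySem.List.pySetD_of_nonneg _ _ hc0, hrow2def]
        congr 1; ring
      have hcons : PySem.List.pyRange (y - 1) yf (-1)
          = (y - 1) :: PySem.List.pyRange (y - 1 - 1) yf (-1) :=
        PySem.List.pyRange_neg_one_cons (by omega)
      rw [deshacer_izquierda_alt, deshacer_izquierda_alt]
      by_cases hnext : y - 1 > yf + 1
      · rw [if_pos ⟨by omega, by omega, hxf, hnext⟩, if_pos ⟨hy0, hyd, hxf, hyyf⟩,
          hrow2', hrowget, hcons, List.foldl_cons, hstep,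
          PySem.List.pySetD_of_nonneg _ _ hx0, PySem.List.pySetD_of_nonneg _ _ hx0,
          List.set_set]
      · rw [if_neg (fun h => hnext h.2.2.2), if_pos ⟨hy0, hyd, hxf, hyyf⟩,
          hrowget, hcons, List.foldl_cons, hstep,
          PySem.List.pyRange_neg_one_eq_nil (by omega), List.foldl_nil]
        exact ht'set.symm
    · rw [deshacer_izquierda, deshacer_izquierda_alt, if_neg hcond]
      split_ifs with h1 h2
      · exact absurd ⟨h1.1, h1.2, h2.1, h2.2⟩ hcond
      · rfl
      · rfl

-- ===== VERDICT =====
theorem deshacer_izquierda_spec : Claim_equal_deshacer_izquierda := by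
  intro t x y xf yf turno dimension _ hpre
  unfold Spec_deshacer_izquierda
  by_cases hcond : 0 ≤ y ∧ y < dimension ∧ x = xf ∧ y > yf + 1
  · obtain ⟨hx0, hxl, hyf, hrow⟩ := hpre hcond
    exact pv_key xf yf turno dimension hyf (y + 1).toNat t x y le_rfl hx0
      (by simpa using hxl) (fun _ => by simpa using hrow)
  · rw [deshacer_izquierda, deshacer_izquierda_alt, if_neg hcond]
    split_ifs with h1 h2
    · exact absurd ⟨h1.1, h1.2, h2.1, h2.2⟩ hcond
    · rfl
    · rfl
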